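-- pv_equiv track=rewrite | github.com/RobinYaoWenbin/Python-CommonCode | python算法/5.13如何找到由其他单词组成的最长单词.py | ComposebyEle
-- ===== SOURCE A (Python) =====
-- def ComposebyEle(strlist , longeststr):
--     # 判断一下longeststr是否能由strlist这个list中的元素组成
--     for i in range(len(strlist)):
--         if strlist[i] == longeststr[0 : len(strlist[i])] :
--             tmp = strlist[0:i] ; tmp.extend(strlist[i+1:])
--             if len(strlist[i]) == len(longeststr):  # 递归出口
--                 return True
--             if ComposebyEle(tmp , longeststr[len(strlist[i]) : ]):
--                 return True
--             else:
--                 pass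
--     return False
-- ===== SOURCE B (Python) =====
-- def ComposebyEle(strlist, longeststr):
--     # Explicit-stack DFS over (remaining string, remaining word list) states
--     # instead of recursive backtracking.
--     stack = [(longeststr, strlist)]
--     while stack:
--         rem, words = stack.pop()
--         for i, w in enumerate(words):
--             if w == rem[0:len(w)]:
--                 if len(w) == len(rem):
--                     return True
--                 stack.append((rem[len(w):], words[:i] + words[i+1:]))
--     return False
-- ===== Notes on version B (the rewrite author's own statement) =====
-- stated objective: alternative
-- what changed: A's recursive backtracking with early returns is replaced by an iterative explicit-stack DFS over (remaining string, remaining word list) states; the recursion disappears and the worklist carries the reduced word list per state.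
import Mathlib
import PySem

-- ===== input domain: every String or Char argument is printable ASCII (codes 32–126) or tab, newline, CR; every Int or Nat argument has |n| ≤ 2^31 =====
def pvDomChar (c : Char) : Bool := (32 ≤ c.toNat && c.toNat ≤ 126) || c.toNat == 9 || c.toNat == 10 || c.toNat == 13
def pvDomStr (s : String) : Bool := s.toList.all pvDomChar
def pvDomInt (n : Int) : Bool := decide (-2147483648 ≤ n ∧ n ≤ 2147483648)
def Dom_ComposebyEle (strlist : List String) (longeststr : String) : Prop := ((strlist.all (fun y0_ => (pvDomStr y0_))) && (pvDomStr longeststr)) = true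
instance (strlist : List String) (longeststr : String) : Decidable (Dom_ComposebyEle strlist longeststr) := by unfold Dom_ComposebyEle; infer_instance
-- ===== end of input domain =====

-- B replaces A's recursive backtracking by an explicit-stack DFS over
-- (remaining string, remaining word list) states; same return value (alternative decomposition).

-- ===== PORT A =====
-- the for-loop of A: index i runs over range(len(strlist)); recursion on the shrinking list
def goA (strlist : List String) (longeststr : String) (i : Nat) : Bool :=
  if h : i < strlist.length then
    let w := strlist[i]
    if w == PySem.Str.slice longeststr (some 0) (some (PySem.Str.len w)) then
      -- tmp = strlist[0:i] ; tmp.extend(strlist[i+1:])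
      let tmp := PySem.List.slice strlist (some 0) (some (i : Int)) ++
                 PySem.List.slice strlist (some ((i : Int) + 1)) none
      if PySem.Str.len w == PySem.Str.len longeststr then true
      else if goA tmp (PySem.Str.slice longeststr (some (PySem.Str.len w)) none) 0 then true
      else goA strlist longeststr (i + 1)
    else goA strlist longeststr (i + 1)
  else false
termination_by (strlist.length, strlist.length - i)
decreasing_by
  · have h1 : PySem.List.slice strlist (some (0 : Int)) (some (i : Int)) = strlist.take i := by
      simp [PySem.List.slice_to_natCast]
    have h2 : PySem.List.slice strlist (some ((i : Int) + 1)) none = strlist.drop (i + 1) := by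
      have := PySem.List.slice_from_natCast strlist (i + 1)
      simpa [Int.natCast_add] using this
    left
    simp only [h1, h2, List.length_append, List.length_take, List.length_drop]
    omega
  · right; omega
  · right; omega

def ComposebyEle (strlist : List String) (longeststr : String) : Bool :=
  goA strlist longeststr 0

-- ===== PORT B =====
-- B's inner for-loop over `words`: pre = words already scanned (words[:i]), todo = words[i:],
-- acc = children pushed so far (in push order); `none` = the loop hit `return True`.
def innerB (rem : String) (pre : List String) (todo : List String)
    (acc : List (String × List String)) : Option (List (String × List String)) :=
  match todo with
  | [] => some acc
  | w :: ws =>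
    if w == PySem.Str.slice rem (some 0) (some (PySem.Str.len w)) then
      if PySem.Str.len w == PySem.Str.len rem then none
      else innerB rem (pre ++ [w]) ws
             (acc ++ [(PySem.Str.slice rem (some (PySem.Str.len w)) none, pre ++ ws)])
    else innerB rem (pre ++ [w]) ws acc

-- weight for the termination measure of the DFS worklist
def wtP (p : String × List String) : Nat := (p.2.length + 1).factorial
def muP (st : List (String × List String)) : Nat := (st.map wtP).sum

-- every child pushed by the loop carries a word list one shorter; at most todo.length children
theorem innerB_mu (todo : List String) : ∀ (pre : List String) (rem : String)
    (acc cs : List (String × List String)), innerB rem pre todo acc = some cs →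
    muP cs ≤ muP acc + todo.length * (pre.length + todo.length).factorial := by
  induction todo with
  | nil =>
    intro pre rem acc cs h
    simp [innerB] at h
    simp [h]
  | cons w ws ih =>
    intro pre rem acc cs h
    simp only [innerB] at h
    by_cases hpre : (w == PySem.Str.slice rem (some 0) (some (PySem.Str.len w))) = true
    · rw [if_pos hpre] at h
      by_cases hfull : (PySem.Str.len w == PySem.Str.len rem) = true
      · rw [if_pos hfull] at h
        exact absurd h (by simp)
      · rw [if_neg hfull] at h
        have hih := ih (pre ++ [w]) rem _ cs h
        have hlen : (pre ++ [w]).length + ws.length = pre.length + (w :: ws).length := by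
          simp; omega
        rw [hlen] at hih
        have hwt : muP (acc ++ [(PySem.Str.slice rem (some (PySem.Str.len w)) none, pre ++ ws)])
            = muP acc + (pre.length + ws.length + 1).factorial := by
          simp [muP, wtP]
        rw [hwt] at hih
        simp only [List.length_cons] at hih ⊢
        have e : pre.length + (ws.length + 1) = pre.length + ws.length + 1 := by omega
        rw [e] at hih ⊢
        rw [Nat.succ_mul]
        omega
    · rw [if_neg hpre] at h
      have := ih (pre ++ [w]) rem acc cs h
      have hlen : (pre ++ [w]).length + ws.length = pre.length + (w :: ws).length := by
        simp; omega
      rw [hlen] at this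
      refine le_trans this ?_
      have : ws.length ≤ (w :: ws).length := by simp
      exact Nat.add_le_add_left (Nat.mul_le_mul_right _ this) _

theorem muP_pop (rem : String) (words : List String) (rest cs : List (String × List String))
    (h : innerB rem [] words [] = some cs) :
    muP (cs.reverse ++ rest) < muP ((rem, words) :: rest) := by
  have hb := innerB_mu words [] rem [] cs h
  have hb' : muP cs ≤ words.length * words.length.factorial := by
    simpa [muP] using hb
  have hrev : muP (cs.reverse ++ rest) = muP cs + muP rest := by
    simp [muP]
  have hwt : muP ((rem, words) :: rest) = (words.length + 1).factorial + muP rest := by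
    simp [muP, wtP]
  have hlt : words.length * words.length.factorial < (words.length + 1).factorial := by
    rw [Nat.factorial_succ]
    have := Nat.factorial_pos words.length
    nlinarith
  rw [hrev, hwt]
  omega

-- B's while-loop: the Python stack pops from the end, so the Lean list carries the TOP AT ITS HEAD
-- (children appended w1,…,wk become reversed in front); exact same pop/push discipline.
def dfsB (st : List (String × List String)) : Bool :=
  match st with
  | [] => false
  | (rem, words) :: rest =>
    match _h : innerB rem [] words [] with
    | none => true
    | some cs => dfsB (cs.reverse ++ rest)
termination_by muP st
decreasing_by
  exact muP_pop rem words rest _ _h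

def ComposebyEle_alt (strlist : List String) (longeststr : String) : Bool :=
  dfsB [(longeststr, strlist)]

-- ===== PRECONDITION & SPEC =====
def Spec_ComposebyEle (strlist : List String) (longeststr : String) (out : Bool) : Prop := out = ComposebyEle_alt strlist longeststr
instance (strlist : List String) (longeststr : String) (out : Bool) : Decidable (Spec_ComposebyEle strlist longeststr out) := by unfold Spec_ComposebyEle; infer_instance

-- ===== CLAIM (what is proved, stated in full; the proofs are below) =====
def Claim_equal_ComposebyEle : Prop := ∀ (strlist : List String) (longeststr : String), Dom_ComposebyEle strlist longeststr → Spec_ComposebyEle strlist longeststr (ComposebyEle strlist longeststr)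

-- ===== LEMMAS AND PROOFS =====

theorem tmp_eq (pre ws : List String) (w : String) :
    PySem.List.slice (pre ++ w :: ws) (some 0) (some (pre.length : Int)) ++
      PySem.List.slice (pre ++ w :: ws) (some ((pre.length : Int) + 1)) none = pre ++ ws := by
  have h1 : PySem.List.slice (pre ++ w :: ws) (some (0 : Int)) (some (pre.length : Int))
      = (pre ++ w :: ws).take pre.length := by
    simp [PySem.List.slice_to_natCast]
  have h2 : PySem.List.slice (pre ++ w :: ws) (some ((pre.length : Int) + 1)) none
      = (pre ++ w :: ws).drop (pre.length + 1) := by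
    have := PySem.List.slice_from_natCast (pre ++ w :: ws) (pre.length + 1)
    simpa [Int.natCast_add] using this
  rw [h1, h2, List.take_left]
  congr 1
  have : pre ++ w :: ws = (pre ++ [w]) ++ ws := by simp
  rw [this]
  simp

theorem getElem_mid (pre ws : List String) (w : String) (h : pre.length < (pre ++ w :: ws).length) :
    (pre ++ w :: ws)[pre.length] = w := by
  rw [List.getElem_append_right (le_refl pre.length)]
  simp

-- the loop of B and the loop of A agree: a `none` means A returns True at this state, a `some cs`
-- means A's result at this state is the disjunction of A's results at the pushed children
theorem innerB_goA (todo : List String) : ∀ (pre : List String) (rem : String)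
    (acc : List (String × List String)),
    (innerB rem pre todo acc = none → goA (pre ++ todo) rem pre.length = true) ∧
    (∀ cs, innerB rem pre todo acc = some cs →
      (goA (pre ++ todo) rem pre.length || acc.any (fun c => ComposebyEle c.2 c.1))
        = cs.any (fun c => ComposebyEle c.2 c.1)) := by
  induction todo with
  | nil =>
    intro pre rem acc
    constructor
    · intro h; simp [innerB] at h
    · intro cs h
      simp [innerB] at h
      subst h
      have : ¬ pre.length < (pre ++ ([] : List String)).length := by simp
      rw [goA, dif_neg this]
      simp
  | cons w ws ih =>
    intro pre rem acc
    have hlt : pre.length < (pre ++ w :: ws).length := by simp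
    have hget : (pre ++ w :: ws)[pre.length] = w := getElem_mid pre ws w hlt
    have hpp : (pre ++ [w]) ++ ws = pre ++ w :: ws := by simp
    have hppl : (pre ++ [w]).length = pre.length + 1 := by simp
    constructor
    · intro h
      simp only [innerB] at h
      rw [goA, dif_pos hlt]
      simp only [hget]
      by_cases hpre : (w == PySem.Str.slice rem (some 0) (some (PySem.Str.len w))) = true
      · rw [if_pos hpre] at h ⊢
        by_cases hfull : (PySem.Str.len w == PySem.Str.len rem) = true
        · rw [if_pos hfull]
        · rw [if_neg hfull] at h ⊢
          have := (ih (pre ++ [w]) rem _).1 h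
          rw [hpp, hppl] at this
          rw [this]
          split <;> rfl
      · rw [if_neg hpre] at h ⊢
        have := (ih (pre ++ [w]) rem acc).1 h
        rw [hpp, hppl] at this
        exact this
    · intro cs h
      simp only [innerB] at h
      rw [goA, dif_pos hlt]
      simp only [hget]
      by_cases hpre : (w == PySem.Str.slice rem (some 0) (some (PySem.Str.len w))) = true
      · rw [if_pos hpre] at h ⊢
        by_cases hfull : (PySem.Str.len w == PySem.Str.len rem) = true
        · rw [if_pos hfull] at h; exact absurd h (by simp)
        · rw [if_neg hfull] at h ⊢
          have := (ih (pre ++ [w]) rem _).2 cs h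
          rw [hpp, hppl] at this
          rw [← this]
          have hchild : ComposebyEle (pre ++ ws)
              (PySem.Str.slice rem (some (PySem.Str.len w)) none)
              = goA (pre ++ ws) (PySem.Str.slice rem (some (PySem.Str.len w)) none) 0 := rfl
          rw [tmp_eq pre ws w]
          simp only [List.any_append, List.any_cons, List.any_nil, ← hchild]
          cases hc : ComposebyEle (pre ++ ws) (PySem.Str.slice rem (some (PySem.Str.len w)) none) <;>
            cases goA (pre ++ w :: ws) rem (pre.length + 1) <;>
            cases acc.any (fun c => ComposebyEle c.2 c.1) <;> simp
      · rw [if_neg hpre] at h ⊢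
        have := (ih (pre ++ [w]) rem acc).2 cs h
        rw [hpp, hppl] at this
        exact this

theorem dfsB_eq_any : ∀ (n : Nat) (st : List (String × List String)), muP st ≤ n →
    dfsB st = st.any (fun c => ComposebyEle c.2 c.1) := by
  intro n
  induction n with
  | zero =>
    intro st hst
    match st with
    | [] => simp [dfsB]
    | (rem, words) :: rest =>
      exfalso
      have : 0 < muP ((rem, words) :: rest) := by
        have := Nat.factorial_pos (words.length + 1)
        simp only [muP, List.map_cons, List.sum_cons, wtP]
        omega
      omega
  | succ n ihn =>
    intro st hst
    match st with
    | [] => simp [dfsB]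
    | (rem, words) :: rest =>
      rw [dfsB]
      split
      next h =>
        have := (innerB_goA words [] rem []).1 h
        simp only [List.nil_append, List.length_nil] at this
        have hA : ComposebyEle words rem = true := this
        simp [hA]
      next cs h =>
        have hmu := muP_pop rem words rest cs h
        have := ihn (cs.reverse ++ rest) (by omega)
        rw [this]
        have hB := (innerB_goA words [] rem []).2 cs h
        simp only [List.nil_append, List.length_nil, List.any_nil, Bool.or_false] at hB
        have hA : ComposebyEle words rem = cs.any (fun c => ComposebyEle c.2 c.1) := hB
        simp [List.any_append, List.any_reverse, hA]

-- ===== VERDICT (by name: the statement is the Claim_ definition above) =====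
theorem ComposebyEle_spec : Claim_equal_ComposebyEle := by
  intro strlist longeststr _
  unfold Spec_ComposebyEle ComposebyEle_alt
  rw [dfsB_eq_any (muP [(longeststr, strlist)]) _ (le_refl _)]
  simp
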